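-- pv_equiv track=rewrite | github.com/HalavicH/stalker-localization-toolbox | sltools/utils/xml_utils.py | add_blank_line_before_comments
-- ===== SOURCE A (Python) =====
-- def add_blank_line_before_comments(formatted_xml):
--     lines = formatted_xml.split('\n')
--     output_lines = []
--     in_comment_block = False
--     for line in lines:
--         if line.strip().startswith('<!--'):
--             if not in_comment_block:
--                 output_lines.append('')  # Add a blank line before a new comment block
--                 in_comment_block = True
--         else:
--             in_comment_block = False
--         output_lines.append(line)
--     return '\n'.join(output_lines)
-- ===== SOURCE B (Python) =====
-- def add_blank_line_before_comments(formatted_xml):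
--     lines = formatted_xml.split('\n')
--     out = []
--     i = 0
--     n = len(lines)
--     while i < n:
--         if lines[i].strip().startswith('<!--'):
--             j = i
--             while j < n and lines[j].strip().startswith('<!--'):
--                 j += 1
--             out.append('')
--             out.extend(lines[i:j])
--             i = j
--         else:
--             out.append(lines[i])
--             i += 1
--     return '\n'.join(out)
-- ===== Notes on version B (the rewrite author's own statement) =====
-- stated objective: alternative
-- what changed: Replaces the per-line boolean state flag with a run-based traversal: B scans each maximal contiguous comment block with an inner while and emits one blank line followed by the whole block at once.
import Mathlib
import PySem

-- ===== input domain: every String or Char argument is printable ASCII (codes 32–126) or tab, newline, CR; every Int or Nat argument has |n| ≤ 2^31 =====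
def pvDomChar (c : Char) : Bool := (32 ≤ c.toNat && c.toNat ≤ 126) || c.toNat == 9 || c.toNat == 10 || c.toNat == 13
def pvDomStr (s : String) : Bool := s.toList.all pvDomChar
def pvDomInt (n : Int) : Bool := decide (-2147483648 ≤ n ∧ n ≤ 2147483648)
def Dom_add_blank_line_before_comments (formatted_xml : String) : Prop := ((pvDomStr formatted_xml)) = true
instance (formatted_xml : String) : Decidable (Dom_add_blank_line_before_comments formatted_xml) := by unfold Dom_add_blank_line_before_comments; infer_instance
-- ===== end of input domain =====

-- B replaces A's per-line boolean flag with a run-based scan of each contiguous comment block (alternative decomposition, same cost).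

-- line.strip().startswith('<!--') — the same test both Pythons perform on each line
def pvIsComment (line : String) : Bool :=
  PySem.Str.startswith (PySem.Str.strip line) "<!--"

-- ===== PORT A =====
-- the loop body of A: state = (output_lines, in_comment_block)
def pvAStep (st : List String × Bool) (line : String) : List String × Bool :=
  let st' :=
    if pvIsComment line then
      if !st.2 then (st.1 ++ [""], true) else st
    else (st.1, false)
  (st'.1 ++ [line], st'.2)

def add_blank_line_before_comments (formatted_xml : String) : String :=
  let lines := (PySem.Str.split? formatted_xml "\n").getD []
  let res := lines.foldl pvAStep ([], false)
  PySem.Str.join "\n" res.1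

-- ===== PORT B =====
-- the outer while loop of B: a comment line opens a run (inner while = takeWhile), else pass the line through
def pvBGo : List String → List String
  | [] => []
  | l :: ls =>
    if pvIsComment l then
      "" :: (l :: ls.takeWhile pvIsComment) ++ pvBGo (ls.dropWhile pvIsComment)
    else l :: pvBGo ls
termination_by ls => ls.length
decreasing_by
  · exact Nat.lt_succ_of_le (List.length_dropWhile_le _ _)
  · exact Nat.lt_succ_self _

def add_blank_line_before_comments_alt (formatted_xml : String) : String :=
  PySem.Str.join "\n" (pvBGo ((PySem.Str.split? formatted_xml "\n").getD []))

-- ===== PRECONDITION & SPEC =====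
def Spec_add_blank_line_before_comments (formatted_xml : String) (out : String) : Prop := out = add_blank_line_before_comments_alt formatted_xml
instance (formatted_xml : String) (out : String) : Decidable (Spec_add_blank_line_before_comments formatted_xml out) := by unfold Spec_add_blank_line_before_comments; infer_instance

-- ===== CLAIM (what is proved, stated in full; the proofs are below) =====
def Claim_equal_add_blank_line_before_comments : Prop := ∀ (formatted_xml : String), Dom_add_blank_line_before_comments formatted_xml → Spec_add_blank_line_before_comments formatted_xml (add_blank_line_before_comments formatted_xml)

-- ===== LEMMAS AND PROOFS =====

-- the lines A's fold appends after starting from flag `flag`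
def pvAEmit (flag : Bool) : List String → List String
  | [] => []
  | l :: ls =>
    if pvIsComment l then
      (if flag then [l] else ["", l]) ++ pvAEmit true ls
    else l :: pvAEmit false ls

theorem pvFoldl_eq_emit (ls : List String) (out : List String) (flag : Bool) :
    (ls.foldl pvAStep (out, flag)).1 = out ++ pvAEmit flag ls := by
  induction ls generalizing out flag with
  | nil => simp [pvAEmit]
  | cons l ls ih =>
    simp only [List.foldl_cons, pvAStep, pvAEmit]
    by_cases h : pvIsComment l = true <;> cases flag <;>
      simp [h, ih]

theorem pvEmit_eq_bgo (n : Nat) (ls : List String) (h : ls.length ≤ n) :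
    pvAEmit false ls = pvBGo ls ∧
    pvAEmit true ls = ls.takeWhile pvIsComment ++ pvBGo (ls.dropWhile pvIsComment) := by
  induction n generalizing ls with
  | zero =>
    have : ls = [] := List.eq_nil_of_length_eq_zero (Nat.le_zero.mp h)
    subst this; simp [pvAEmit, pvBGo]
  | succ n ih =>
    cases ls with
    | nil => simp [pvAEmit, pvBGo]
    | cons l ls =>
      have hlen : ls.length ≤ n := Nat.le_of_succ_le_succ h
      by_cases hc : pvIsComment l = true
      · have ih2 := (ih ls hlen).2
        constructor
        · simp [pvAEmit, pvBGo, hc, ih2]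
        · simp [pvAEmit, pvBGo, hc, ih2]
      · have ih1 := (ih ls hlen).1
        constructor
        · simp [pvAEmit, pvBGo, hc, ih1]
        · simp [pvAEmit, pvBGo, hc, ih1]

-- ===== VERDICT (by name: the statement is the Claim_ definition above) =====
theorem add_blank_line_before_comments_spec : Claim_equal_add_blank_line_before_comments := by
  intro s _
  unfold Spec_add_blank_line_before_comments add_blank_line_before_comments add_blank_line_before_comments_alt
  have h1 := pvFoldl_eq_emit (((PySem.Str.split? s "\n").getD [])) [] false
  have h2 := (pvEmit_eq_bgo (((PySem.Str.split? s "\n").getD [])).length (((PySem.Str.split? s "\n").getD [])) le_rfl).1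
  simp only []
  rw [h1, h2, List.nil_append]
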